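-- pv_equiv track=rewrite | github.com/saif543/smart-study-abroad | backend/rag/matcher.py | _fields_related
-- ===== SOURCE A (Python) =====
-- def _fields_related(field1: str, field2: str) -> bool:
--     """Check if two fields are related."""
--     # Define related field groups
--     related_groups = [
--         {'computer science', 'software engineering', 'data science', 'artificial intelligence', 'machine learning', 'information technology', 'cs', 'it'},
--         {'business', 'mba', 'management', 'finance', 'marketing', 'economics'},
--         {'engineering', 'mechanical', 'electrical', 'civil', 'chemical'},
--         {'medicine', 'healthcare', 'nursing', 'public health', 'biomedical'},
--         {'law', 'legal', 'international law'},
--         {'arts', 'humanities', 'literature', 'history', 'philosophy'},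
--     ]
--
--     for group in related_groups:
--         # Check if both fields have keywords from the same group
--         f1_matches = any(keyword in field1 for keyword in group)
--         f2_matches = any(keyword in field2 for keyword in group)
--         if f1_matches and f2_matches:
--             return True
--
--     return False
-- ===== SOURCE B (Python) =====
-- def _fields_related(field1: str, field2: str) -> bool:
--     """Check if two fields are related."""
--     related_groups = [
--         ['computer science', 'software engineering', 'data science', 'artificial intelligence', 'machine learning', 'information technology', 'cs', 'it'],
--         ['business', 'mba', 'management', 'finance', 'marketing', 'economics'],
--         ['engineering', 'mechanical', 'electrical', 'civil', 'chemical'],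
--         ['medicine', 'healthcare', 'nursing', 'public health', 'biomedical'],
--         ['law', 'legal', 'international law'],
--         ['arts', 'humanities', 'literature', 'history', 'philosophy'],
--     ]
--     # Multi-pattern substring search by position scan + hash lookup:
--     # index every keyword by its text, then slide over each field's positions,
--     # looking up the slice of each candidate length in the keyword dict.
--     kw_to_group = {}
--     for gi, group in enumerate(related_groups):
--         for kw in group:
--             kw_to_group[kw] = gi
--     lengths = sorted({len(kw) for kw in kw_to_group})
--
--     def matched(field):
--         found = set()
--         for start in range(len(field)):
--             for L in lengths:
--                 gi = kw_to_group.get(field[start:start + L])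
--                 if gi is not None:
--                     found.add(gi)
--         return found
--
--     return not matched(field1).isdisjoint(matched(field2))
-- ===== Notes on version B (the rewrite author's own statement) =====
-- stated objective: alternative
-- what changed: Replaces A's per-group loop of 'keyword in field' containment scans with a multi-pattern search: a dict keyed by keyword text is built once, each field is scanned position by position looking up the slice of each candidate keyword length in the dict to collect matched group ids, and the two id sets are tested for intersection.
import Mathlib
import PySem

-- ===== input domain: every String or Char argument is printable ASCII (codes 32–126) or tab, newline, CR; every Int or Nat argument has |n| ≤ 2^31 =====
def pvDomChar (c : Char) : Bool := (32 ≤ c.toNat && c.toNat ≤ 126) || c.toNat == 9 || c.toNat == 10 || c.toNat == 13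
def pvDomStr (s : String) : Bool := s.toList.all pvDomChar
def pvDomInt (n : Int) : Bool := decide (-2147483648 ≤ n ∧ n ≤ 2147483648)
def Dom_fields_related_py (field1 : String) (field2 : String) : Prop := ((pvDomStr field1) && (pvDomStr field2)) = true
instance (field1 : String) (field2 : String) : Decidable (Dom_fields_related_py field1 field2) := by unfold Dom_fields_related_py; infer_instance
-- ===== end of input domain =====

-- B replaces A's per-keyword containment scans with a multi-pattern search: a keyword→group-id
-- dict is built once, each field is scanned position by position looking up the slice of each
-- candidate keyword length, and the two matched-id sets are intersected (objective: alternative).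

-- the constant keyword-group table both Pythons carry (pure data; A holds the groups as sets,
-- ported as their distinct-element lists)
def pvRelatedGroups : List (List String) :=
  [ ["computer science", "software engineering", "data science", "artificial intelligence", "machine learning", "information technology", "cs", "it"],
    ["business", "mba", "management", "finance", "marketing", "economics"],
    ["engineering", "mechanical", "electrical", "civil", "chemical"],
    ["medicine", "healthcare", "nursing", "public health", "biomedical"],
    ["law", "legal", "international law"],
    ["arts", "humanities", "literature", "history", "philosophy"] ]

-- ===== PORT A =====
-- A's for-loop with early return, as structural recursion over the group list
def pvLoopA (field1 : String) (field2 : String) : List (List String) → Bool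
  | [] => false
  | g :: rest =>
      let f1Matches := g.any (fun kw => PySem.Str.isIn kw field1)
      let f2Matches := g.any (fun kw => PySem.Str.isIn kw field2)
      if f1Matches && f2Matches then true else pvLoopA field1 field2 rest

def fields_related_py (field1 : String) (field2 : String) : Bool :=
  pvLoopA field1 field2 pvRelatedGroups

-- ===== PORT B =====
-- kw_to_group = {}; for gi, group in enumerate(related_groups): for kw in group: kw_to_group[kw] = gi
def pvKwToGroup : PySem.Dict String Int :=
  (PySem.List.enumerate pvRelatedGroups 0).foldl
    (fun d p => p.2.foldl (fun d kw => d.insert kw p.1) d) PySem.Dict.empty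

-- lengths = sorted({len(kw) for kw in kw_to_group})
def pvLengths : List Int :=
  PySem.List.sorted
    (PySem.Set.ofList (pvKwToGroup.keys.map (fun kw => (PySem.Str.len kw : Int))))
    (fun x => x) false

-- def matched(field): found = set(); for start in range(len(field)): for L in lengths:
--   gi = kw_to_group.get(field[start:start+L]);  if gi is not None: found.add(gi);  return found
def pvMatched (field : String) : PySem.Set Int :=
  (PySem.List.pyRange 0 (PySem.Str.len field : Int) 1).foldl
    (fun found start =>
      pvLengths.foldl
        (fun found L =>
          match pvKwToGroup.get? (PySem.Str.slice field (some start) (some (start + L))) with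
          | some gi => PySem.Set.add found gi
          | none => found)
        found)
    PySem.Set.empty

-- return not matched(field1).isdisjoint(matched(field2))
def fields_related_py_alt (field1 : String) (field2 : String) : Bool :=
  !(PySem.Set.isdisjoint (pvMatched field1) (pvMatched field2))

-- ===== PRECONDITION & SPEC =====
def Spec_fields_related_py (field1 : String) (field2 : String) (out : Bool) : Prop := out = fields_related_py_alt field1 field2
instance (field1 : String) (field2 : String) (out : Bool) : Decidable (Spec_fields_related_py field1 field2 out) := by unfold Spec_fields_related_py; infer_instance

-- ===== CLAIM (what is proved, stated in full; the proofs are below) =====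
def Claim_equal_fields_related_py : Prop := ∀ (field1 : String) (field2 : String), Dom_fields_related_py field1 field2 → Spec_fields_related_py field1 field2 (fields_related_py field1 field2)

-- ===== LEMMAS AND PROOFS =====

-- the keyword→group pairs pvKwToGroup holds (all 35 keywords are distinct across groups)
def pvKwPairs : List (String × Int) :=
  (PySem.List.enumerate pvRelatedGroups 0).flatMap (fun p => p.2.map (fun kw => (kw, p.1)))

set_option maxRecDepth 8000 in
lemma pv_items_eq : pvKwToGroup.items = pvKwPairs := by decide

set_option maxRecDepth 8000 in
lemma pv_nodup_keys : pvKwToGroup.keys.Nodup := by decide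

set_option maxRecDepth 8000 in
lemma pv_lengths_pos : ∀ L ∈ pvLengths, 0 ≤ L := by decide

set_option maxRecDepth 8000 in
lemma pv_key_props : ∀ p ∈ pvKwPairs, p.1.toList ≠ [] ∧ ((p.1.toList.length : Int) ∈ pvLengths) := by
  decide

set_option maxRecDepth 8000 in
lemma pv_pairs_to_group :
    ∀ p ∈ pvKwPairs, ∃ q ∈ PySem.List.enumerate pvRelatedGroups 0, p.2 = q.1 ∧ p.1 ∈ q.2 := by
  decide

set_option maxRecDepth 8000 in
lemma pv_group_to_pairs :
    ∀ q ∈ PySem.List.enumerate pvRelatedGroups 0, ∀ kw ∈ q.2, (kw, q.1) ∈ pvKwPairs := by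
  decide

-- membership in a set-accumulating fold, with the step kept abstract
lemma pv_mem_foldl_step {β : Type} (l : List β) (h : PySem.Set Int → β → PySem.Set Int)
    (Q : β → Int → Prop) (hyp : ∀ s b x, x ∈ h s b ↔ x ∈ s ∨ Q b x) (s0 : PySem.Set Int) (x : Int) :
    x ∈ l.foldl h s0 ↔ x ∈ s0 ∨ ∃ b ∈ l, Q b x := by
  induction l generalizing s0 with
  | nil => simp
  | cons b rest ih =>
      rw [List.foldl_cons, ih]
      simp only [List.mem_cons, hyp]
      constructor
      · rintro ((h | hq) | ⟨b', hb', hq⟩)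
        · exact Or.inl h
        · exact Or.inr ⟨b, Or.inl rfl, hq⟩
        · exact Or.inr ⟨b', Or.inr hb', hq⟩
      · rintro (h | ⟨b', (rfl | hb'), hq⟩)
        · exact Or.inl (Or.inl h)
        · exact Or.inl (Or.inr hq)
        · exact Or.inr ⟨b', hb', hq⟩

lemma pv_mem_matched (field : String) (x : Int) :
    x ∈ pvMatched field ↔
      ∃ start ∈ PySem.List.pyRange 0 (PySem.Str.len field : Int) 1, ∃ L ∈ pvLengths,
        pvKwToGroup.get? (PySem.Str.slice field (some start) (some (start + L))) = some x := by
  unfold pvMatched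
  rw [pv_mem_foldl_step _ _
    (fun start x => ∃ L ∈ pvLengths,
      pvKwToGroup.get? (PySem.Str.slice field (some start) (some (start + L))) = some x)]
  · simp
  · intro s start y
    rw [pv_mem_foldl_step _ _
      (fun L y => pvKwToGroup.get? (PySem.Str.slice field (some start) (some (start + L))) = some y)]
    intro s' L z
    cases hg : pvKwToGroup.get? (PySem.Str.slice field (some start) (some (start + L))) with
    | none => simp
    | some gi =>
        simp only [PySem.Set.mem_add, Option.some.injEq]
        constructor
        · rintro (h | rfl)
          · exact Or.inl h
          · exact Or.inr rfl
        · rintro (h | rfl)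
          · exact Or.inl h
          · exact Or.inr rfl

-- a keyword of a length in pvLengths occurs as a looked-up slice iff it is a substring
lemma pv_occ (kw : List Char) (field : String) (hne : kw ≠ [])
    (hlen : ((kw.length : Int) ∈ pvLengths)) :
    (∃ start ∈ PySem.List.pyRange 0 (PySem.Str.len field : Int) 1, ∃ L ∈ pvLengths,
        (PySem.Str.slice field (some start) (some (start + L))).toList = kw)
      ↔ PySem.Chars.isIn kw field.toList = true := by
  constructor
  · rintro ⟨start, hs, L, hL, heq⟩
    rw [PySem.List.mem_pyRange_one] at hs
    have hL0 : 0 ≤ L := pv_lengths_pos L hL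
    rw [PySem.Str.toList_slice, PySem.Chars.slice_eq_listSlice,
        PySem.List.slice_toNat _ hs.1 (by omega)] at heq
    rw [← PySem.Chars.exists_prefix_drop_iff_isIn]
    exact ⟨start.toNat, heq ▸ List.take_prefix _ _⟩
  · intro hin
    rw [← PySem.Chars.exists_prefix_drop_iff_isIn] at hin
    obtain ⟨j, hpre⟩ := hin
    have hj : j < field.toList.length := by
      by_contra h
      push_neg at h
      rw [List.drop_eq_nil_of_le h] at hpre
      exact hne (List.prefix_nil.mp hpre)
    refine ⟨(j : Int), ?_, (kw.length : Int), hlen, ?_⟩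
    · rw [PySem.List.mem_pyRange_one]
      have := PySem.Str.len_eq field
      omega
    · rw [PySem.Str.toList_slice, PySem.Chars.slice_eq_listSlice,
        PySem.List.slice_natCast_add]
      exact (List.prefix_iff_eq_take.mp hpre).symm

lemma pv_mem_matched_iff_kw (field : String) (x : Int) :
    x ∈ pvMatched field ↔
      ∃ kw : String, (kw, x) ∈ pvKwPairs ∧ PySem.Str.isIn kw field = true := by
  rw [pv_mem_matched]
  constructor
  · rintro ⟨start, hs, L, hL, hget⟩
    have hmem : (PySem.Str.slice field (some start) (some (start + L)), x) ∈ pvKwPairs := by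
      rw [← pv_items_eq]
      exact PySem.Dict.mem_items_of_get?_eq_some _ hget
    obtain ⟨hne, hlen⟩ := pv_key_props _ hmem
    refine ⟨_, hmem, ?_⟩
    rw [PySem.Str.isIn_eq]
    exact (pv_occ _ field hne hlen).mp ⟨start, hs, L, hL, rfl⟩
  · rintro ⟨kw, hmem, hin⟩
    obtain ⟨hne, hlen⟩ := pv_key_props _ hmem
    rw [PySem.Str.isIn_eq] at hin
    obtain ⟨start, hs, L, hL, heq⟩ := (pv_occ kw.toList field hne hlen).mpr hin
    refine ⟨start, hs, L, hL, ?_⟩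
    have hstr : PySem.Str.slice field (some start) (some (start + L)) = kw :=
      String.toList_inj.mp heq
    rw [← pv_items_eq] at hmem
    rw [hstr]
    exact PySem.Dict.get?_of_mem_items _ hmem pv_nodup_keys

lemma pvLoopA_true_iff (f1 f2 : String) (gs : List (List String)) :
    pvLoopA f1 f2 gs = true ↔
      ∃ g ∈ gs, (∃ kw ∈ g, PySem.Str.isIn kw f1 = true) ∧ (∃ kw ∈ g, PySem.Str.isIn kw f2 = true) := by
  induction gs with
  | nil => simp [pvLoopA]
  | cons g rest ih =>
      simp only [pvLoopA]
      by_cases h1 : (∃ kw ∈ g, PySem.Str.isIn kw f1 = true) ∧ (∃ kw ∈ g, PySem.Str.isIn kw f2 = true)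
      · simp only [List.mem_cons]
        obtain ⟨⟨k1, hk1, e1⟩, ⟨k2, hk2, e2⟩⟩ := h1
        rw [if_pos]
        · constructor
          · intro _; exact ⟨g, Or.inl rfl, ⟨k1, hk1, e1⟩, ⟨k2, hk2, e2⟩⟩
          · intro _; rfl
        · simp only [Bool.and_eq_true, List.any_eq_true]
          exact ⟨⟨k1, hk1, e1⟩, ⟨k2, hk2, e2⟩⟩
      · rw [if_neg, ih]
        · constructor
          · rintro ⟨g', hg', hh⟩; exact ⟨g', List.mem_cons_of_mem _ hg', hh⟩
          · rintro ⟨g', hg', hh⟩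
            rcases List.mem_cons.mp hg' with rfl | hmem
            · exact absurd hh h1
            · exact ⟨g', hmem, hh⟩
        · simp only [Bool.and_eq_true, List.any_eq_true]
          exact h1

-- ===== VERDICT (by name: the statement is the Claim_ definition above) =====
theorem fields_related_py_spec : Claim_equal_fields_related_py := by
  intro f1 f2 _
  unfold Spec_fields_related_py fields_related_py fields_related_py_alt
  rw [Bool.eq_iff_iff, pvLoopA_true_iff, Bool.not_eq_true', Bool.eq_false_iff, Ne,
      PySem.Set.isdisjoint_iff]
  push_neg
  constructor
  · rintro ⟨g, hg, ⟨k1, hk1, e1⟩, ⟨k2, hk2, e2⟩⟩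
    obtain ⟨i, hi, rfl⟩ := List.mem_iff_getElem.mp hg
    have hq : ((0 + (i : Int)), pvRelatedGroups[i]) ∈ PySem.List.enumerate pvRelatedGroups 0 := by
      rw [PySem.List.mem_enumerate_iff]
      exact ⟨i, hi, rfl⟩
    refine ⟨(0 + (i : Int)), ?_, ?_⟩
    · exact (pv_mem_matched_iff_kw f1 _).mpr ⟨k1, pv_group_to_pairs _ hq _ hk1, e1⟩
    · exact (pv_mem_matched_iff_kw f2 _).mpr ⟨k2, pv_group_to_pairs _ hq _ hk2, e2⟩
  · rintro ⟨x, hx1, hx2⟩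
    obtain ⟨kw1, hp1, hin1⟩ := (pv_mem_matched_iff_kw f1 x).mp hx1
    obtain ⟨kw2, hp2, hin2⟩ := (pv_mem_matched_iff_kw f2 x).mp hx2
    obtain ⟨q1, hq1, hxq1, hkw1⟩ := pv_pairs_to_group _ hp1
    obtain ⟨q2, hq2, hxq2, hkw2⟩ := pv_pairs_to_group _ hp2
    rw [PySem.List.mem_enumerate_iff] at hq1 hq2
    obtain ⟨i1, hi1, rfl⟩ := hq1
    obtain ⟨i2, hi2, rfl⟩ := hq2
    have hii : i1 = i2 := by
      simp only at hxq1 hxq2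
      omega
    subst hii
    exact ⟨pvRelatedGroups[i1], List.getElem_mem hi1, ⟨kw1, hkw1, hin1⟩, ⟨kw2, hkw2, hin2⟩⟩
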